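-- pv_equiv track=rewrite | github.com/BrunoEstrella1707/ReconhecedorDeComandosSQL | main.py | caso_select
-- ===== SOURCE A (Python) =====
-- def getNextToken(command):
--     command.pop(0)
--     return command
--
-- def caso_select(command):
--     getNextToken(command)
--     if command[0] == '*':
--         getNextToken(command)
--         if command[0] == 'FROM':
--             getNextToken(command)
--             if command[0] not in comandos_reservados:
--                 getNextToken(command)
--                 if command[0] == ';':
--                     return True
--                 elif command[0] == 'ORDER':
--                     getNextToken(command)
--                     if command[0] == 'BY':
--                         getNextToken(command)
--                         if command[0] not in comandos_reservados:
--                             getNextToken(command)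
--                             if command[0] == ';':
--                                 return True
--                 elif command[0] == 'WHERE':
--                     getNextToken(command)
--                     if command[0] not in comandos_reservados:
--                         getNextToken(command)
--                         if command[0] == '=':
--                             getNextToken(command)
--                             if command[0] not in comandos_reservados:
--                                 getNextToken(command)
--                                 if command[0] == ';':
--                                     return True
--     elif command[0] not in comandos_reservados:
--         getNextToken(command)
--         if command[0] == ',':
--             getNextToken(command)
--             while True:
--                 if command[0] not in comandos_reservados:
--                     getNextToken(command)
--                     if command[0] == 'FROM':
--                         getNextToken(command)
--                         break
--                     elif command[0] == ',':
--                         getNextToken(command)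
--                     else:
--                         return False
--                 else:
--                     return False
--             if command[0] not in comandos_reservados:
--                 getNextToken(command)
--                 if command[0] == ';':
--                     return True
--         elif command[0] == 'FROM':
--             getNextToken(command)
--             if command[0] not in comandos_reservados:
--                 getNextToken(command)
--                 if command[0] == ';':
--                     return True
--
--     return False
--
-- comandos_reservados = ['SELECT', '*', 'FROM', 'WHERE', 'ORDER', 'BY', 'TRUNCATE', 'DELETE', 'CREATE', 'DATABASE', '=', ';', 'VALUES',
--                        'TABLE', 'INSERT', '(', ')', 'UPDATE', ',', 'INTO', 'int', 'float', 'string', 'char', 'bool']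
-- ===== SOURCE B (Python) =====
-- # B: recursive-descent parser over the same mutated token list; pop-based reads,
-- # the while-True column loop becomes recursion, and the repeated "table then ';'"
-- # tail code of A is factored into one shared helper.
--
-- comandos_reservados = ['SELECT', '*', 'FROM', 'WHERE', 'ORDER', 'BY', 'TRUNCATE', 'DELETE', 'CREATE', 'DATABASE', '=', ';', 'VALUES',
--                        'TABLE', 'INSERT', '(', ')', 'UPDATE', ',', 'INTO', 'int', 'float', 'string', 'char', 'bool']
--
-- def _table_semi(command):
--     # identifier followed by ';'
--     if command.pop(0) in comandos_reservados:
--         return False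
--     return command.pop(0) == ';'
--
-- def _from_rest(command):
--     # after 'SELECT * FROM': table, then ';' | ORDER BY col ';' | WHERE col = val ';'
--     if command.pop(0) in comandos_reservados:
--         return False
--     end = command.pop(0)
--     if end == ';':
--         return True
--     if end == 'ORDER':
--         return command.pop(0) == 'BY' and _table_semi(command)
--     if end == 'WHERE':
--         if command.pop(0) in comandos_reservados:
--             return False
--         return command.pop(0) == '=' and _table_semi(command)
--     return False
--
-- def _column_list(command):
--     # col (',' col)* 'FROM' table ';'
--     if command.pop(0) in comandos_reservados:
--         return False
--     sep = command.pop(0)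
--     if sep == 'FROM':
--         return _table_semi(command)
--     if sep == ',':
--         return _column_list(command)
--     return False
--
-- def caso_select(command):
--     command.pop(0)
--     head = command.pop(0)
--     if head == '*':
--         return command.pop(0) == 'FROM' and _from_rest(command)
--     if head in comandos_reservados:
--         return False
--     sep = command.pop(0)
--     if sep == 'FROM':
--         return _table_semi(command)
--     if sep == ',':
--         return _column_list(command)
--     return False
-- ===== Notes on version B (the rewrite author's own statement) =====
-- stated objective: simpler
-- what changed: A's one big nested-if function with the column loop written as `while True` and the identifier-then-';' tail code duplicated three times becomes a small recursive-descent parser: the loop is natural recursion (_column_list) and the shared tail is one helper (_table_semi) reused by the '*', comma-list, single-column and ORDER BY/WHERE paths.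
import Mathlib
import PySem

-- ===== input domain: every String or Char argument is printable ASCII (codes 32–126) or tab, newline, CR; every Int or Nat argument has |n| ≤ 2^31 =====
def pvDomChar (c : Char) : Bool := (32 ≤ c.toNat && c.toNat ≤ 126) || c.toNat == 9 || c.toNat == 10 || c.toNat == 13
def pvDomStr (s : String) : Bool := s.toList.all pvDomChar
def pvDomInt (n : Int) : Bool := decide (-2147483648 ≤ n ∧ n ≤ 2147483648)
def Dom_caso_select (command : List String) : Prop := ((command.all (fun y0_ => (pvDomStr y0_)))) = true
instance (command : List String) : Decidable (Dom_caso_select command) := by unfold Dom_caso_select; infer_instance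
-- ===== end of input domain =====

-- B is a recursive-descent decomposition of A (recursion instead of `while True`, one shared
-- identifier-';' helper). Equivalence is about the RETURN value only: both Pythons pop from
-- `command` in place, and B consumes one token more than A on most paths.

def reservados : List String := ["SELECT", "*", "FROM", "WHERE", "ORDER", "BY", "TRUNCATE", "DELETE", "CREATE", "DATABASE", "=", ";", "VALUES",
                       "TABLE", "INSERT", "(", ")", "UPDATE", ",", "INTO", "int", "float", "string", "char", "bool"]

-- ===== PORT A =====
-- A's `while True` column loop, with the code after `break` (table then ';') inlined at the break.
-- getNextToken (pop(0)) followed by command[0] is ported as matching off the head; the [] arms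
-- are the IndexError points of the Python, excluded by Pre_caso_select (default false there).
def caso_loop : List String → Bool
  | [] => false
  | c0 :: rest =>
    if c0 ∈ reservados then false
    else
      match rest with
      | [] => false
      | c1 :: rest2 =>
        if c1 = "FROM" then
          -- break: then `if command[0] not in reservados: pop; if command[0] == ';': return True`
          match rest2 with
          | [] => false
          | d0 :: rest3 =>
            if d0 ∈ reservados then false
            else
              match rest3 with
              | [] => false
              | d1 :: _ => d1 = ";"
        else if c1 = "," then caso_loop rest2
        else false

def caso_select (command : List String) : Bool :=
  match command with
  | [] => false
  | _ :: rest =>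
    match rest with
    | [] => false
    | t1 :: r2 =>
      if t1 = "*" then
        match r2 with
        | [] => false
        | t2 :: r3 =>
          if t2 = "FROM" then
            match r3 with
            | [] => false
            | t3 :: r4 =>
              if t3 ∈ reservados then false
              else
                match r4 with
                | [] => false
                | t4 :: r5 =>
                  if t4 = ";" then true
                  else if t4 = "ORDER" then
                    match r5 with
                    | [] => false
                    | t5 :: r6 =>
                      if t5 = "BY" then
                        match r6 with
                        | [] => false
                        | t6 :: r7 =>
                          if t6 ∈ reservados then false
                          else
                            match r7 with
                            | [] => false
                            | t7 :: _ => t7 = ";"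
                      else false
                  else if t4 = "WHERE" then
                    match r5 with
                    | [] => false
                    | t5 :: r6 =>
                      if t5 ∈ reservados then false
                      else
                        match r6 with
                        | [] => false
                        | t6 :: r7 =>
                          if t6 = "=" then
                            match r7 with
                            | [] => false
                            | t7 :: r8 =>
                              if t7 ∈ reservados then false
                              else
                                match r8 with
                                | [] => false
                                | t8 :: _ => t8 = ";"
                          else false
                  else false
          else false
      else if t1 ∈ reservados then false
      else
        match r2 with
        | [] => false
        | t2 :: r3 =>
          if t2 = "," then caso_loop r3
          else if t2 = "FROM" then
            match r3 with
            | [] => false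
            | t3 :: r4 =>
              if t3 ∈ reservados then false
              else
                match r4 with
                | [] => false
                | t4 :: _ => t4 = ";"
          else false

-- ===== PORT B =====
-- Source B's pop-based helpers: each helper pops (uncons) the tokens it reads.
def table_semi : List String → Bool
  | [] => false
  | t :: rest =>
    if t ∈ reservados then false
    else
      match rest with
      | [] => false
      | e :: _ => e = ";"

def from_rest : List String → Bool
  | [] => false
  | t :: rest =>
    if t ∈ reservados then false
    else
      match rest with
      | [] => false
      | e :: r2 =>
        if e = ";" then true
        else if e = "ORDER" then
          match r2 with
          | [] => false
          | b :: r3 => b = "BY" && table_semi r3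
        else if e = "WHERE" then
          match r2 with
          | [] => false
          | col :: r3 =>
            if col ∈ reservados then false
            else
              match r3 with
              | [] => false
              | eq :: r4 => eq = "=" && table_semi r4
        else false

def column_list : List String → Bool
  | [] => false
  | col :: rest =>
    if col ∈ reservados then false
    else
      match rest with
      | [] => false
      | sep :: r2 =>
        if sep = "FROM" then table_semi r2
        else if sep = "," then column_list r2
        else false

def caso_select_alt : List String → Bool
  | _ :: head :: rest =>
    if head = "*" then
      match rest with
      | [] => false
      | t :: r2 => t = "FROM" && from_rest r2
    else if head ∈ reservados then false
    else
      match rest with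
      | [] => false
      | sep :: r2 =>
        if sep = "FROM" then table_semi r2
        else if sep = "," then column_list r2
        else false
  | _ => false

-- ===== PRECONDITION & SPEC =====
-- Pre_ is exactly the inputs on which the Python A returns (True or False); on its complement A
-- pops/indexes past the end of the token list and raises IndexError.
def tok (command : List String) (i : Nat) : String := command.getD i ""

def Pre_caso_select (command : List String) : Prop :=
  2 ≤ command.length ∧
  (tok command 1 = "*" → 3 ≤ command.length ∧
    (tok command 2 = "FROM" → 4 ≤ command.length ∧
      (tok command 3 ∉ reservados → 5 ≤ command.length ∧
        (tok command 4 = "ORDER" → 6 ≤ command.length ∧ (tok command 5 = "BY" → 7 ≤ command.length ∧ (tok command 6 ∉ reservados → 8 ≤ command.length))) ∧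
        (tok command 4 = "WHERE" → 6 ≤ command.length ∧ (tok command 5 ∉ reservados → 7 ≤ command.length ∧
          (tok command 6 = "=" → 8 ≤ command.length ∧ (tok command 7 ∉ reservados → 9 ≤ command.length))))))) ∧
  (tok command 1 ≠ "*" → tok command 1 ∉ reservados → 3 ≤ command.length ∧
    (tok command 2 = "FROM" → 4 ≤ command.length ∧ (tok command 3 ∉ reservados → 5 ≤ command.length)) ∧
    (tok command 2 = "," → ∃ k ∈ List.range command.length,
      (∀ j ∈ List.range k, tok command (3 + 2 * j) ∉ reservados ∧ 5 + 2 * j ≤ command.length ∧ tok command (4 + 2 * j) = ",") ∧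
      4 + 2 * k ≤ command.length ∧
      (tok command (3 + 2 * k) ∉ reservados → 5 + 2 * k ≤ command.length ∧
        (tok command (4 + 2 * k) = "FROM" → 6 + 2 * k ≤ command.length ∧ (tok command (5 + 2 * k) ∉ reservados → 7 + 2 * k ≤ command.length))) ∧
      ¬(tok command (3 + 2 * k) ∉ reservados ∧ 5 + 2 * k ≤ command.length ∧ tok command (4 + 2 * k) = ",")))

instance (command : List String) : Decidable (Pre_caso_select command) := by
  unfold Pre_caso_select
  repeat'
    first
    | refine @instDecidableAnd _ _ ?_ ?_
    | refine @instDecidableForall _ _ ?_ ?_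
    | infer_instance

def pvWitness_caso_select : List String := ["SELECT", "*", "FROM", "tab", ";"]

def Spec_caso_select (command : List String) (out : Bool) : Prop := out = caso_select_alt command
instance (command : List String) (out : Bool) : Decidable (Spec_caso_select command out) := by unfold Spec_caso_select; infer_instance

-- ===== CLAIM (what is proved, stated in full; the proofs are below) =====
def Claim_equal_caso_select : Prop := ∀ (command : List String), Dom_caso_select command → Pre_caso_select command → Spec_caso_select command (caso_select command)

-- ===== LEMMAS AND PROOFS =====

theorem loop_eq : ∀ (r : List String), caso_loop r = column_list r
  | [] => rfl
  | c0 :: rest => by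
    rw [caso_loop.eq_def, column_list.eq_def]
    by_cases h : c0 ∈ reservados
    · simp [h]
    · simp only [if_neg h]
      cases rest with
      | nil => rfl
      | cons c1 rest2 =>
        by_cases h1 : c1 = "FROM"
        · simp only [if_pos h1]
          cases rest2 with
          | nil => rfl
          | cons d0 rest3 =>
            simp [table_semi.eq_def]
        · by_cases h2 : c1 = ","
          · simp only [if_neg h1, if_pos h2]
            exact loop_eq rest2
          · simp [h1, h2]

theorem ports_eq (c : List String) : caso_select c = caso_select_alt c := by
  match c with
  | [] => rfl
  | [_] => rfl
  | x :: t1 :: r2 =>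
    simp only [caso_select.eq_def, caso_select_alt.eq_def]
    repeat' split
    all_goals
      first
      | rfl
      | simp_all [from_rest.eq_def, table_semi.eq_def, loop_eq]

-- ===== VERDICT (by name: the statement is the Claim_ definition above) =====
theorem caso_select_spec : Claim_equal_caso_select := by
  intro c _ _
  unfold Spec_caso_select
  exact ports_eq c
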